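-- pv_equiv track=rewrite | github.com/officialfelixmunyany-ctrl/joylandschools | backend/joyland/integrations/education.py | _parse_activities
-- ===== SOURCE A (Python) =====
-- from typing import Dict, List, Any, Optional
--
-- def _parse_activities(text: str) -> Dict[str, List[str]]:
--     """Parse AI response into differentiated activities."""
--     activities = {
--         'support': [],
--         'standard': [],
--         'extension': []
--     }
--     current_level = None
--
--     for line in text.split('\n'):
--         line = line.strip()
--         if not line:
--             continue
--
--         if line.lower().startswith('support'):
--             current_level = 'support'
--         elif line.lower().startswith('standard'):
--             current_level = 'standard'
--         elif line.lower().startswith('extension'):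
--             current_level = 'extension'
--         elif line.startswith('-') and current_level:
--             activities[current_level].append(line.lstrip('- '))
--
--     return activities
-- ===== SOURCE B (Python) =====
-- def _parse_activities(text):
--     """Parse AI response into differentiated activities.
--
--     Each dash line's level is found independently by searching backwards for
--     the nearest header line above it (no threaded state)."""
--     LEVELS = ('support', 'standard', 'extension')
--
--     def level_of(s):
--         low = s.lower()
--         for lvl in LEVELS:
--             if low.startswith(lvl):
--                 return lvl
--         return None
--
--     lines = [s for s in (r.strip() for r in text.split('\n')) if s]
--
--     def nearest_level(i):
--         for j in range(i - 1, -1, -1):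
--             lvl = level_of(lines[j])
--             if lvl is not None:
--                 return lvl
--         return None
--
--     return {lvl: [line.lstrip('- ')
--                   for i, line in enumerate(lines)
--                   if level_of(line) is None
--                   and line.startswith('-')
--                   and nearest_level(i) == lvl]
--             for lvl in LEVELS}
-- ===== Notes on version B (the rewrite author's own statement) =====
-- stated objective: alternative
-- what changed: A is a single-pass state machine threading current_level through the lines and appending into a dict; B has no state: it resolves each dash line's level independently by a backward search for the nearest header line above it, building each level's list by its own comprehension.
import Mathlib
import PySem

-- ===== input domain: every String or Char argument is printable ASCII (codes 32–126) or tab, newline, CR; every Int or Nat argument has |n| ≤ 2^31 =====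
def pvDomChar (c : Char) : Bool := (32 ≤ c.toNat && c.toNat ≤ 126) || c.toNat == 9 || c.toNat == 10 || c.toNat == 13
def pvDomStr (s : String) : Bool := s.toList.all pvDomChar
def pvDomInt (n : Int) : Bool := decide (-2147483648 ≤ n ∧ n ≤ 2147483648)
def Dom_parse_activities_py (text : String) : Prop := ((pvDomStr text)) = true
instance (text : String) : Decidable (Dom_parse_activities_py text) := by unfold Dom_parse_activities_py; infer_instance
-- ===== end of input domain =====

-- B replaces A's single-pass state machine (current_level threaded through the lines) by a
-- stateless formulation: each dash line's level is found by a backward search for the nearest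
-- header line above it; objective: alternative decomposition. Return-value equivalence only.

-- ===== PORT A =====
-- line.lstrip('- '): drop leading characters from the set {'-', ' '} (exact hand port of str.lstrip with a char set)
def pyLstripDashSpace (s : String) : String :=
  String.ofList (s.toList.dropWhile (fun c => c = '-' || c = ' '))

-- A's loop body (the state is the activities dict together with current_level)
def pvStepA (st : PySem.Dict String (List String) × Option String) (rawline : String) :
    PySem.Dict String (List String) × Option String :=
  let line := PySem.Str.strip rawline
  if line = "" then st
  else if PySem.Str.startswith (PySem.Str.lower line) "support" then (st.1, some "support")
  else if PySem.Str.startswith (PySem.Str.lower line) "standard" then (st.1, some "standard")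
  else if PySem.Str.startswith (PySem.Str.lower line) "extension" then (st.1, some "extension")
  else if PySem.Str.startswith line "-" && st.2.isSome then
    match st.2 with
    | some lvl => (st.1.modify lvl [] (fun xs => xs ++ [pyLstripDashSpace line]), st.2)
    | none => st
  else st

-- text.split('\n') is ported as PySem.Chars.splitOn on the code points (exact: the separator is nonempty)
def parse_activities_py (text : String) : List (String × List String) :=
  ((((PySem.Chars.splitOn text.toList ['\n']).map String.ofList).foldl pvStepA
      (((PySem.Dict.empty.insert "support" []).insert "standard" []).insert "extension" [], none)).1).items

-- ===== PORT B =====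
-- B's level_of helper (the loop over ('support','standard','extension') unrolled)
def pvLevelOf (line : String) : Option String :=
  if PySem.Str.startswith (PySem.Str.lower line) "support" then some "support"
  else if PySem.Str.startswith (PySem.Str.lower line) "standard" then some "standard"
  else if PySem.Str.startswith (PySem.Str.lower line) "extension" then some "extension"
  else none

-- B's nearest_level(i): the for-loop over range(i-1,-1,-1) visits exactly the reversed
-- prefix lines[:i]; returning the first non-None level_of is findSome? on that list (exact)
def pvNearestLevel (lines : List String) (i : Nat) : Option String :=
  (lines.take i).reverse.findSome? pvLevelOf

-- B's per-level comprehension over enumerate(lines)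
def pvItemsB (lvl : String) (lines : List String) : List String :=
  lines.zipIdx.filterMap (fun li =>
    if pvLevelOf li.1 = none ∧ PySem.Str.startswith li.1 "-" = true ∧
        pvNearestLevel lines li.2 = some lvl
    then some (pyLstripDashSpace li.1) else none)

-- the result dict comprehension over the three levels
def pvBuild (lines : List String) : List (String × List String) :=
  [("support", pvItemsB "support" lines),
   ("standard", pvItemsB "standard" lines),
   ("extension", pvItemsB "extension" lines)]

def parse_activities_py_alt (text : String) : List (String × List String) :=
  pvBuild ((((PySem.Chars.splitOn text.toList ['\n']).map String.ofList).map
    PySem.Str.strip).filter (fun s => ¬ s = ""))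

-- ===== PRECONDITION & SPEC =====
def Spec_parse_activities_py (text : String) (out : List (String × List String)) : Prop := out = parse_activities_py_alt text
instance (text : String) (out : List (String × List String)) : Decidable (Spec_parse_activities_py text out) := by unfold Spec_parse_activities_py; infer_instance

-- ===== CLAIM (what is proved, stated in full; the proofs are below) =====
def Claim_equal_parse_activities_py : Prop := ∀ (text : String), Dom_parse_activities_py text → Spec_parse_activities_py text (parse_activities_py text)

-- ===== LEMMAS AND PROOFS =====

-- The dict A threads always has exactly the three literal keys, in insertion order.
def pvDict3 (s t e : List String) : PySem.Dict String (List String) :=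
  PySem.Dict.mk [("support", s), ("standard", t), ("extension", e)]

theorem pvDict3_modify_support (s t e : List String) (f : List String → List String) :
    (pvDict3 s t e).modify "support" [] f = pvDict3 (f s) t e := by
  simp [pvDict3, PySem.Dict.modify, PySem.Dict.contains, PySem.Dict.getD, PySem.Dict.get?,
    PySem.Dict.insert]

theorem pvDict3_modify_standard (s t e : List String) (f : List String → List String) :
    (pvDict3 s t e).modify "standard" [] f = pvDict3 s (f t) e := by
  simp [pvDict3, PySem.Dict.modify, PySem.Dict.contains, PySem.Dict.getD, PySem.Dict.get?,
    PySem.Dict.insert]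

theorem pvDict3_modify_extension (s t e : List String) (f : List String → List String) :
    (pvDict3 s t e).modify "extension" [] f = pvDict3 s t (f e) := by
  simp [pvDict3, PySem.Dict.modify, PySem.Dict.contains, PySem.Dict.getD, PySem.Dict.get?,
    PySem.Dict.insert]

-- Items that A attributes to level `lvl`, over the RAW lines, given the current level.
def pvRawItems (lvl : String) : Option String → List String → List String
  | _, [] => []
  | cur, raw :: ls =>
    let line := PySem.Str.strip raw
    if line = "" then pvRawItems lvl cur ls
    else if PySem.Str.startswith (PySem.Str.lower line) "support" then pvRawItems lvl (some "support") ls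
    else if PySem.Str.startswith (PySem.Str.lower line) "standard" then pvRawItems lvl (some "standard") ls
    else if PySem.Str.startswith (PySem.Str.lower line) "extension" then pvRawItems lvl (some "extension") ls
    else if PySem.Str.startswith line "-" && cur.isSome then
      (if cur = some lvl then [pyLstripDashSpace line] else []) ++ pvRawItems lvl cur ls
    else pvRawItems lvl cur ls

-- Same attribution over the CLEANED lines (stripped, empties removed).
def pvItemsFor (lvl : String) : Option String → List String → List String
  | _, [] => []
  | cur, l :: ls =>
    match pvLevelOf l with
    | some lv => pvItemsFor lvl (some lv) ls
    | none =>
      (if PySem.Str.startswith l "-" = true ∧ cur = some lvl then [pyLstripDashSpace l] else [])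
        ++ pvItemsFor lvl cur ls

-- Same attribution again, with the state replaced by the REVERSED processed prefix.
def pvItemsC (lvl : String) : List String → List String → List String
  | _, [] => []
  | pre, l :: ls =>
    (if pvLevelOf l = none ∧ PySem.Str.startswith l "-" = true ∧
        pre.findSome? pvLevelOf = some lvl
      then [pyLstripDashSpace l] else []) ++ pvItemsC lvl (l :: pre) ls

def pvCurOK (cur : Option String) : Prop :=
  cur = none ∨ cur = some "support" ∨ cur = some "standard" ∨ cur = some "extension"

-- A's fold, characterised: starting from pvDict3 s t e, the fold appends pvRawItems per key.
theorem pvFoldA_eq (raws : List String) : ∀ (cur : Option String), pvCurOK cur →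
    ∀ (s t e : List String),
    (raws.foldl pvStepA (pvDict3 s t e, cur)).1 =
      pvDict3 (s ++ pvRawItems "support" cur raws)
              (t ++ pvRawItems "standard" cur raws)
              (e ++ pvRawItems "extension" cur raws) := by
  induction raws with
  | nil => intro cur _ s t e; simp [pvRawItems]
  | cons raw ls ih =>
    intro cur hcur s t e
    simp only [List.foldl_cons, pvStepA, pvRawItems]
    split
    · exact ih cur hcur s t e
    · split
      · simpa using ih (some "support") (by simp [pvCurOK]) s t e
      · split
        · simpa using ih (some "standard") (by simp [pvCurOK]) s t e
        · split
          · simpa using ih (some "extension") (by simp [pvCurOK]) s t e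
          · split
            · rename_i hne hsup hstd hext hdash
              rcases hcur with h | h | h | h <;> subst h
              · simp at hdash
              · simp only [pvDict3_modify_support]
                rw [ih (some "support") (by simp [pvCurOK])]
                simp
              · simp only [pvDict3_modify_standard]
                rw [ih (some "standard") (by simp [pvCurOK])]
                simp
              · simp only [pvDict3_modify_extension]
                rw [ih (some "extension") (by simp [pvCurOK])]
                simp
            · exact ih cur hcur s t e

-- pvRawItems over raw lines = pvItemsFor over the cleaned lines.
theorem pvRawItems_eq_clean (lvl : String) (raws : List String) : ∀ (cur : Option String),
    pvRawItems lvl cur raws =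
      pvItemsFor lvl cur (((raws.map PySem.Str.strip).filter (fun s => ¬ s = ""))) := by
  induction raws with
  | nil => intro cur; simp [pvRawItems, pvItemsFor]
  | cons raw ls ih =>
    intro cur
    simp only [pvRawItems, List.map_cons, List.filter_cons]
    by_cases hemp : PySem.Str.strip raw = ""
    · simp [hemp, ih]
    · rw [if_neg hemp]
      have hd : (decide ¬PySem.Str.strip raw = "") = true := by simpa using hemp
      rw [hd, if_pos rfl]
      simp only [pvItemsFor, pvLevelOf]
      split
      · simp [ih]
      · split
        · simp [ih]
        · split
          · simp [ih]
          · by_cases hdash : PySem.Chars.startswith (PySem.Chars.strip raw.toList) ['-'] = true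
            · cases cur with
              | none => simp [hdash, ih]
              | some c =>
                by_cases hc : c = lvl
                · simp [hdash, hc, ih]
                · simp [hdash, hc, ih]
            · simp [hdash, ih]

-- The threaded state equals findSome? on the reversed processed prefix.
theorem pvItemsFor_eq_C (lvl : String) : ∀ (ls pre : List String),
    pvItemsFor lvl (pre.findSome? pvLevelOf) ls = pvItemsC lvl pre ls := by
  intro ls
  induction ls with
  | nil => intro pre; simp [pvItemsFor, pvItemsC]
  | cons l ls ih =>
    intro pre
    simp only [pvItemsFor, pvItemsC]
    cases hlo : pvLevelOf l with
    | some lv =>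
      have h1 : (l :: pre).findSome? pvLevelOf = some lv := by simp [hlo]
      have h2 := ih (l :: pre)
      rw [h1] at h2
      simp [h2]
    | none =>
      have hcons : (l :: pre).findSome? pvLevelOf = pre.findSome? pvLevelOf := by simp [hlo]
      have h2 := ih (l :: pre)
      rw [hcons] at h2
      simp [h2]

-- B's comprehension over enumerate = pvItemsC (the backward scan from index i sees
-- exactly the reversed prefix).
theorem pvZip_eq_C (lvl : String) (full : List String) :
    ∀ (rest pre : List String), full = pre.reverse ++ rest →
    (rest.zipIdx pre.length).filterMap (fun li =>
      if pvLevelOf li.1 = none ∧ PySem.Str.startswith li.1 "-" = true ∧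
          pvNearestLevel full li.2 = some lvl
      then some (pyLstripDashSpace li.1) else none) = pvItemsC lvl pre rest := by
  intro rest
  induction rest with
  | nil => intro pre _; simp [pvItemsC]
  | cons l ls ih =>
    intro pre hfull
    have htake : pvNearestLevel full pre.length = pre.findSome? pvLevelOf := by
      have : full.take pre.length = pre.reverse := by
        rw [hfull]
        exact List.take_left' (List.length_reverse) -- take (pre.reverse.length) (pre.reverse ++ _)
      simp [pvNearestLevel, this]
    have hih := ih (l :: pre) (by simp [hfull])
    simp only [List.length_cons] at hih
    simp only [List.zipIdx_cons, List.filterMap_cons, pvItemsC, htake]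
    by_cases hc : pvLevelOf l = none ∧ PySem.Str.startswith l "-" = true ∧
        pre.findSome? pvLevelOf = some lvl
    · rw [if_pos hc, if_pos hc, hih]
      rfl
    · rw [if_neg hc, if_neg hc, hih]
      rfl

-- ===== VERDICT (by name: the statement is the Claim_ definition above) =====
theorem parse_activities_py_spec : Claim_equal_parse_activities_py := by
  intro text _
  unfold Spec_parse_activities_py parse_activities_py parse_activities_py_alt pvBuild
  have hinit : ((((PySem.Dict.empty.insert "support" ([] : List String)).insert "standard" []).insert "extension" []),
      (none : Option String)) = (pvDict3 [] [] [], none) := by decide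
  rw [hinit, pvFoldA_eq ((PySem.Chars.splitOn text.toList ['\n']).map String.ofList) none (Or.inl rfl) [] [] []]
  have hB : ∀ lvl, pvItemsB lvl ((((PySem.Chars.splitOn text.toList ['\n']).map String.ofList).map
      PySem.Str.strip).filter (fun s => ¬ s = "")) =
      pvItemsFor lvl none ((((PySem.Chars.splitOn text.toList ['\n']).map String.ofList).map
      PySem.Str.strip).filter (fun s => ¬ s = "")) := by
    intro lvl
    have h0 := pvZip_eq_C lvl ((((PySem.Chars.splitOn text.toList ['\n']).map String.ofList).map
      PySem.Str.strip).filter (fun s => ¬ s = "")) ((((PySem.Chars.splitOn text.toList ['\n']).map String.ofList).map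
      PySem.Str.strip).filter (fun s => ¬ s = "")) [] (by rw [List.reverse_nil, List.nil_append])
    simp only [List.length_nil] at h0
    have h2 := pvItemsFor_eq_C lvl ((((PySem.Chars.splitOn text.toList ['\n']).map String.ofList).map
      PySem.Str.strip).filter (fun s => ¬ s = "")) []
    simp only [List.findSome?_nil] at h2
    unfold pvItemsB
    rw [h0, ← h2]
  rw [pvRawItems_eq_clean, pvRawItems_eq_clean, pvRawItems_eq_clean, ← hB, ← hB, ← hB]
  rfl
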